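-- pv_equiv track=rewrite | github.com/abhhinavm1018/CEOProgram | for_loops.py | short_hand
-- ===== SOURCE A (Python) =====
-- def short_hand(short):
--     if "and" in short.lower():
--         short = short.replace("and", "&")
--     if "too" in short.lower():
--         short = short.replace("too", "2")
--     if "you" in short.lower():
--         short = short.replace("you", "U")
--         short = short.replace("You", "U")
--     if "for" in short.lower():
--         short = short.replace("for", "4")
--     vowels = "aeiouAEIO"
--     for letters in short:
--         if letters in vowels:
--             short = short.replace(letters, "")
--     return short
-- ===== SOURCE B (Python) =====
-- def short_hand(short):
--     # Single left-to-right scan: substitute shorthand tokens and drop vowels in one pass.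
--     table = (("and", "&"), ("too", "2"), ("you", "U"), ("You", "U"), ("for", "4"))
--     vowels = "aeiouAEIO"
--     out = []
--     i = 0
--     n = len(short)
--     while i < n:
--         for pat, rep in table:
--             if short.startswith(pat, i):
--                 out.append(rep)
--                 i += len(pat)
--                 break
--         else:
--             ch = short[i]
--             if ch not in vowels:
--                 out.append(ch)
--             i += 1
--     return "".join(out)
-- ===== Notes on version B (the rewrite author's own statement) =====
-- stated objective: alternative
-- what changed: Fused A's four sequential global replace passes plus its per-vowel global replace loop into a single left-to-right table-driven scan that substitutes the shorthand tokens and skips vowels in one traversal.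
import Mathlib
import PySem

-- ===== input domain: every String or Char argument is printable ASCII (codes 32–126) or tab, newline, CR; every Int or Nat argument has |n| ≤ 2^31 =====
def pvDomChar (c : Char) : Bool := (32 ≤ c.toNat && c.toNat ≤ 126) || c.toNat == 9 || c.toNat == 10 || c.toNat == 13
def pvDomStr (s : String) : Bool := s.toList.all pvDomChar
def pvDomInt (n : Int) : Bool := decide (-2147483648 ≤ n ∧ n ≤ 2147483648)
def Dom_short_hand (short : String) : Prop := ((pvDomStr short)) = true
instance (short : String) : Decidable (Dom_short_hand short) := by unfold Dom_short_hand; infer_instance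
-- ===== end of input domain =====

-- B fuses A's four global replace passes and its per-vowel replace loop into one
-- left-to-right scan over the string (objective: alternative single-pass algorithm).


-- ===== PORT A =====
def short_hand (short : String) : String :=
  let s1 := if PySem.Str.isIn "and" (PySem.Str.lower short) then PySem.Str.replace short "and" "&" else short
  let s2 := if PySem.Str.isIn "too" (PySem.Str.lower s1) then PySem.Str.replace s1 "too" "2" else s1
  let s3 := if PySem.Str.isIn "you" (PySem.Str.lower s2) then
      PySem.Str.replace (PySem.Str.replace s2 "you" "U") "You" "U" else s2
  let s4 := if PySem.Str.isIn "for" (PySem.Str.lower s3) then PySem.Str.replace s3 "for" "4" else s3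
  -- for letters in short: if letters in vowels: short = short.replace(letters, "")
  s4.toList.foldl (fun acc c =>
    if PySem.Str.isIn (String.ofList [c]) "aeiouAEIO" then PySem.Str.replace acc (String.ofList [c]) "" else acc) s4

-- ===== PORT B =====
def pvVowels : List Char := ['a','e','i','o','u','A','E','I','O']

-- single left-to-right scan: substitute the shorthand table, skip vowels, copy the rest
def pvScanB : List Char → List Char
  | [] => []
  | c :: t =>
    if List.isPrefixOf ['a','n','d'] (c :: t) then '&' :: pvScanB (t.drop 2)
    else if List.isPrefixOf ['t','o','o'] (c :: t) then '2' :: pvScanB (t.drop 2)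
    else if List.isPrefixOf ['y','o','u'] (c :: t) then 'U' :: pvScanB (t.drop 2)
    else if List.isPrefixOf ['Y','o','u'] (c :: t) then 'U' :: pvScanB (t.drop 2)
    else if List.isPrefixOf ['f','o','r'] (c :: t) then '4' :: pvScanB (t.drop 2)
    else if c ∈ pvVowels then pvScanB t
    else c :: pvScanB t
termination_by l => l.length
decreasing_by all_goals (simp [List.length_drop]; try omega)

def short_hand_alt (short : String) : String := String.ofList (pvScanB short.toList)

-- ===== PRECONDITION & SPEC =====
def Spec_short_hand (short : String) (out : String) : Prop := out = short_hand_alt short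
instance (short : String) (out : String) : Decidable (Spec_short_hand short out) := by unfold Spec_short_hand; infer_instance

-- ===== CLAIM (what is proved, stated in full; the proofs are below) =====
def Claim_equal_short_hand : Prop := ∀ (short : String), Dom_short_hand short → Spec_short_hand short (short_hand short)

-- ===== LEMMAS AND PROOFS =====

-- Structural form of PySem.Chars.replace (for a nonempty pattern).
def pvRep (old nw : List Char) : List Char → List Char
  | [] => []
  | c :: t =>
    if List.isPrefixOf old (c :: t) then nw ++ pvRep old nw (t.drop (old.length - 1))
    else c :: pvRep old nw t
termination_by l => l.length
decreasing_by all_goals (simp [List.length_drop]; try omega)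

theorem pvRep_cons_ne (old nw : List Char) (c : Char) (t : List Char)
    (h : List.isPrefixOf old (c :: t) = false) : pvRep old nw (c :: t) = c :: pvRep old nw t := by
  rw [pvRep, if_neg (by simp [h])]

theorem pvRep_cons_eq (old nw : List Char) (c : Char) (t : List Char)
    (h : List.isPrefixOf old (c :: t) = true) :
    pvRep old nw (c :: t) = nw ++ pvRep old nw (t.drop (old.length - 1)) := by
  rw [pvRep, if_pos h]

theorem pvGo_eq (old nw : List Char) (ho : old ≠ []) :
    ∀ (fuel : Nat) (l acc : List Char), l.length ≤ fuel →
      PySem.Chars.replace.go old nw fuel l acc = acc.reverse ++ pvRep old nw l := by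
  intro fuel
  induction fuel with
  | zero =>
    intro l acc h
    have hl : l = [] := by cases l with
      | nil => rfl
      | cons c t => simp at h
    subst hl
    rw [PySem.Chars.replace.go.eq_def]
    simp [pvRep]
  | succ n ih =>
    intro l acc h
    cases l with
    | nil => rw [PySem.Chars.replace.go.eq_def]; simp [pvRep]
    | cons c t =>
      rw [PySem.Chars.replace.go.eq_def]
      simp only []
      by_cases hp : List.isPrefixOf old (c :: t) = true
      · simp only [hp, if_pos]
        obtain ⟨k, hk⟩ : ∃ k, old.length = k + 1 := by
          cases old with
          | nil => exact absurd rfl ho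
          | cons a b => exact ⟨b.length, by simp⟩
        have hdrop : List.drop old.length (c :: t) = t.drop (old.length - 1) := by
          rw [hk]; simp
        have hlen : (List.drop old.length (c :: t)).length ≤ n := by
          simp [List.length_drop] at *
          omega
        rw [ih _ _ hlen]
        rw [pvRep, if_pos hp, hdrop]
        simp
      · simp only [hp, if_neg, Bool.false_eq_true, not_false_iff]
        have hlen : t.length ≤ n := by simp at h; omega
        rw [ih _ _ hlen]
        rw [pvRep, if_neg (by simp [hp])]
        simp

theorem pvReplace_eq (old nw s : List Char) (ho : old ≠ []) :
    PySem.Chars.replace s old nw = pvRep old nw s := by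
  unfold PySem.Chars.replace
  rw [if_neg (by simp [ho])]
  rw [pvGo_eq old nw ho s.length s [] le_rfl]
  simp

theorem pvRep_id (old nw s : List Char) (h : ¬ old <:+: s) : pvRep old nw s = s := by
  induction s with
  | nil => simp [pvRep]
  | cons c t ih =>
    rw [pvRep, if_neg]
    · rw [ih (fun hi => h (hi.trans (List.suffix_cons c t).isInfix))]
    · intro hp
      exact h (List.isPrefixOf_iff_prefix.mp hp).isInfix

theorem pvRep_inv (old : List Char) (r d : Char) (l u : List Char) (hd : d ≠ r)
    (h : pvRep old [r] l = d :: u) : ∃ t, l = d :: t ∧ u = pvRep old [r] t := by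
  cases l with
  | nil => simp [pvRep] at h
  | cons c t =>
    by_cases hp : List.isPrefixOf old (c :: t) = true
    · rw [pvRep, if_pos hp] at h
      simp at h
      exact absurd h.1.symm hd
    · rw [pvRep, if_neg (by simp [hp])] at h
      injection h with h1 h2
      exact ⟨t, by rw [h1], h2.symm⟩

theorem pvRep_single_nil (c : Char) (l : List Char) :
    pvRep [c] [] l = l.filter (fun x => x != c) := by
  induction l with
  | nil => simp [pvRep]
  | cons d t ih =>
    by_cases hc : c = d
    · subst hc
      rw [pvRep, if_pos (by simp [List.isPrefixOf])]
      simp [ih]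
    · rw [pvRep, if_neg (by simp [List.isPrefixOf]; exact fun h => hc h)]
      rw [ih, List.filter_cons_of_pos (by simp [bne]; exact fun h => hc h.symm)]

-- "f copies every character outside sp": replacement passes preserve unmatched characters.
def PvCopies (f : List Char → List Char) (sp : List Char) : Prop :=
  ∀ (d : Char) (l u : List Char), d ∉ sp → f l = d :: u → ∃ t, l = d :: t ∧ u = f t

theorem pvCopies_rep (old : List Char) (r : Char) : PvCopies (pvRep old [r]) [r] := by
  intro d l u hd h
  exact pvRep_inv old r d l u (by simpa using hd) h

theorem pvCopies_comp {f g : List Char → List Char} {sp1 sp2 : List Char}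
    (hf : PvCopies f sp1) (hg : PvCopies g sp2) : PvCopies (fun l => f (g l)) (sp1 ++ sp2) := by
  intro d l u hd h
  simp at hd
  obtain ⟨w, hw1, hw2⟩ := hf d (g l) u hd.1 h
  obtain ⟨t, ht1, ht2⟩ := hg d l w hd.2 hw1
  exact ⟨t, ht1, by rw [hw2, ht2]⟩

theorem pvNotPrefix_image {f : List Char → List Char} {sp : List Char} (hc : PvCopies f sp)
    (p : List Char) (hp : ∀ x ∈ p, x ∉ sp) :
    ∀ l, ¬ p <+: l → ¬ p <+: f l := by
  induction p with
  | nil => intro l h; exact absurd (List.nil_prefix) h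
  | cons a p' ih =>
    intro l h hfl
    obtain ⟨r, hr⟩ := hfl
    obtain ⟨t, ht1, ht2⟩ := hc a l (p' ++ r) (hp a (by simp)) (by simpa using hr.symm)
    subst ht1
    have h' : ¬ p' <+: t := fun hpt => h (List.cons_prefix_cons.mpr ⟨rfl, hpt⟩)
    exact ih (fun x hx => hp x (by simp [hx])) t h' ⟨r, by rw [← ht2]⟩

theorem pvNotPre (p : List Char) (l : List Char) (h : List.isPrefixOf p l = false) : ¬ p <+: l := by
  rw [← List.isPrefixOf_iff_prefix]
  simp [h]

theorem pvPreNot (p : List Char) (l : List Char) (h : ¬ p <+: l) : List.isPrefixOf p l = false := by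
  rw [← Bool.not_eq_true, List.isPrefixOf_iff_prefix]
  exact h

-- the chained replacements of A, in structural form
def pvChain (s : List Char) : List Char :=
  pvRep ['f','o','r'] ['4'] (pvRep ['Y','o','u'] ['U'] (pvRep ['y','o','u'] ['U']
    (pvRep ['t','o','o'] ['2'] (pvRep ['a','n','d'] ['&'] s))))
theorem pvChain_scan_aux : ∀ (n : Nat) (s : List Char), s.length ≤ n →
    (pvChain s).filter (fun x => !(decide (x ∈ pvVowels))) = pvScanB s := by
  intro n
  induction n with
  | zero =>
    intro s h
    have hs : s = [] := List.length_eq_zero_iff.mp (Nat.le_zero.mp h)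
    subst hs
    simp [pvChain, pvRep, pvScanB]
  | succ n ih =>
    intro s hlen
    cases s with
    | nil => simp [pvChain, pvRep, pvScanB]
    | cons c t =>
      have hlt : t.length ≤ n := by simpa using hlen
      by_cases h1 : List.isPrefixOf ['a','n','d'] (c :: t) = true
      · obtain ⟨r, hr⟩ := List.isPrefixOf_iff_prefix.mp h1
        obtain ⟨rfl, rfl⟩ : c = 'a' ∧ t = 'n'::'d'::r := by
          have := hr.symm; simp at this; exact ⟨this.1, this.2⟩
        have e : pvChain ('a'::'n'::'d'::r) = '&' :: pvChain r := by
          simp [pvChain, pvRep_cons_ne, pvRep_cons_eq, List.isPrefixOf]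
        have hr' : r.length ≤ n := by simp at hlen; omega
        rw [e, List.filter_cons_of_pos (by decide), ih r hr', pvScanB]
        simp [List.isPrefixOf]
      · by_cases h2 : List.isPrefixOf ['t','o','o'] (c :: t) = true
        · obtain ⟨r, hr⟩ := List.isPrefixOf_iff_prefix.mp h2
          obtain ⟨rfl, rfl⟩ : c = 't' ∧ t = 'o'::'o'::r := by
            have := hr.symm; simp at this; exact ⟨this.1, this.2⟩
          have e : pvChain ('t'::'o'::'o'::r) = '2' :: pvChain r := by
            simp [pvChain, pvRep_cons_ne, pvRep_cons_eq, List.isPrefixOf]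
          have hr' : r.length ≤ n := by simp at hlen; omega
          rw [e, List.filter_cons_of_pos (by decide), ih r hr', pvScanB]
          simp [List.isPrefixOf]
        · by_cases h3 : List.isPrefixOf ['y','o','u'] (c :: t) = true
          · obtain ⟨r, hr⟩ := List.isPrefixOf_iff_prefix.mp h3
            obtain ⟨rfl, rfl⟩ : c = 'y' ∧ t = 'o'::'u'::r := by
              have := hr.symm; simp at this; exact ⟨this.1, this.2⟩
            have e : pvChain ('y'::'o'::'u'::r) = 'U' :: pvChain r := by
              simp [pvChain, pvRep_cons_ne, pvRep_cons_eq, List.isPrefixOf]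
            have hr' : r.length ≤ n := by simp at hlen; omega
            rw [e, List.filter_cons_of_pos (by decide), ih r hr', pvScanB]
            simp [List.isPrefixOf]
          · by_cases h4 : List.isPrefixOf ['Y','o','u'] (c :: t) = true
            · obtain ⟨r, hr⟩ := List.isPrefixOf_iff_prefix.mp h4
              obtain ⟨rfl, rfl⟩ : c = 'Y' ∧ t = 'o'::'u'::r := by
                have := hr.symm; simp at this; exact ⟨this.1, this.2⟩
              have e : pvChain ('Y'::'o'::'u'::r) = 'U' :: pvChain r := by
                simp [pvChain, pvRep_cons_ne, pvRep_cons_eq, List.isPrefixOf]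
              have hr' : r.length ≤ n := by simp at hlen; omega
              rw [e, List.filter_cons_of_pos (by decide), ih r hr', pvScanB]
              simp [List.isPrefixOf]
            · by_cases h5 : List.isPrefixOf ['f','o','r'] (c :: t) = true
              · obtain ⟨r, hr⟩ := List.isPrefixOf_iff_prefix.mp h5
                obtain ⟨rfl, rfl⟩ : c = 'f' ∧ t = 'o'::'r'::r := by
                  have := hr.symm; simp at this; exact ⟨this.1, this.2⟩
                have e : pvChain ('f'::'o'::'r'::r) = '4' :: pvChain r := by
                  simp [pvChain, pvRep_cons_ne, pvRep_cons_eq, List.isPrefixOf]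
                have hr' : r.length ≤ n := by simp at hlen; omega
                rw [e, List.filter_cons_of_pos (by decide), ih r hr', pvScanB]
                simp [List.isPrefixOf]
              · -- default: no pattern matches at this position
                have e : pvChain (c :: t) = c :: pvChain t := by
                  have hn1 := pvNotPre _ _ (Bool.not_eq_true _ ▸ h1)
                  have hn2 := pvNotPre _ _ (Bool.not_eq_true _ ▸ h2)
                  have hn3 := pvNotPre _ _ (Bool.not_eq_true _ ▸ h3)
                  have hn4 := pvNotPre _ _ (Bool.not_eq_true _ ▸ h4)
                  have hn5 := pvNotPre _ _ (Bool.not_eq_true _ ▸ h5)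
                  have w1 : pvRep ['a','n','d'] ['&'] (c :: t)
                      = c :: pvRep ['a','n','d'] ['&'] t := pvRep_cons_ne _ _ _ _ (pvPreNot _ _ hn1)
                  have i2 : ¬ ['t','o','o'] <+: pvRep ['a','n','d'] ['&'] (c :: t) :=
                    pvNotPrefix_image (pvCopies_rep _ '&') _ (by intro x hx; fin_cases hx <;> decide : ∀ x ∈ (['t','o','o'] : List Char), x ∉ (['&'] : List Char)) _ hn2
                  rw [w1] at i2
                  have w2 : pvRep ['t','o','o'] ['2'] (c :: pvRep ['a','n','d'] ['&'] t)
                      = c :: pvRep ['t','o','o'] ['2'] (pvRep ['a','n','d'] ['&'] t) :=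
                    pvRep_cons_ne _ _ _ _ (pvPreNot _ _ i2)
                  have i3 : ¬ ['y','o','u'] <+:
                      pvRep ['t','o','o'] ['2'] (pvRep ['a','n','d'] ['&'] (c :: t)) :=
                    pvNotPrefix_image
                      (pvCopies_comp (pvCopies_rep _ '2') (pvCopies_rep _ '&')) _ (by intro x hx; fin_cases hx <;> decide : ∀ x ∈ (['y','o','u'] : List Char), x ∉ (['2','&'] : List Char)) _ hn3
                  rw [w1, w2] at i3
                  have w3 : pvRep ['y','o','u'] ['U']
                        (c :: pvRep ['t','o','o'] ['2'] (pvRep ['a','n','d'] ['&'] t))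
                      = c :: pvRep ['y','o','u'] ['U']
                          (pvRep ['t','o','o'] ['2'] (pvRep ['a','n','d'] ['&'] t)) :=
                    pvRep_cons_ne _ _ _ _ (pvPreNot _ _ i3)
                  have i4 : ¬ ['Y','o','u'] <+: pvRep ['y','o','u'] ['U']
                      (pvRep ['t','o','o'] ['2'] (pvRep ['a','n','d'] ['&'] (c :: t))) :=
                    pvNotPrefix_image
                      (pvCopies_comp (pvCopies_rep _ 'U')
                        (pvCopies_comp (pvCopies_rep _ '2') (pvCopies_rep _ '&'))) _ (by intro x hx; fin_cases hx <;> decide : ∀ x ∈ (['Y','o','u'] : List Char), x ∉ (['U','2','&'] : List Char)) _ hn4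
                  rw [w1, w2, w3] at i4
                  have w4 : pvRep ['Y','o','u'] ['U'] (c :: pvRep ['y','o','u'] ['U']
                        (pvRep ['t','o','o'] ['2'] (pvRep ['a','n','d'] ['&'] t)))
                      = c :: pvRep ['Y','o','u'] ['U'] (pvRep ['y','o','u'] ['U']
                          (pvRep ['t','o','o'] ['2'] (pvRep ['a','n','d'] ['&'] t))) :=
                    pvRep_cons_ne _ _ _ _ (pvPreNot _ _ i4)
                  have i5 : ¬ ['f','o','r'] <+: pvRep ['Y','o','u'] ['U'] (pvRep ['y','o','u'] ['U']
                      (pvRep ['t','o','o'] ['2'] (pvRep ['a','n','d'] ['&'] (c :: t)))) :=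
                    pvNotPrefix_image
                      (pvCopies_comp (pvCopies_rep _ 'U')
                        (pvCopies_comp (pvCopies_rep _ 'U')
                          (pvCopies_comp (pvCopies_rep _ '2') (pvCopies_rep _ '&')))) _ (by intro x hx; fin_cases hx <;> decide : ∀ x ∈ (['f','o','r'] : List Char), x ∉ (['U','U','2','&'] : List Char)) _ hn5
                  rw [w1, w2, w3, w4] at i5
                  have w5 : pvRep ['f','o','r'] ['4'] (c :: pvRep ['Y','o','u'] ['U']
                        (pvRep ['y','o','u'] ['U'] (pvRep ['t','o','o'] ['2']
                          (pvRep ['a','n','d'] ['&'] t))))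
                      = c :: pvRep ['f','o','r'] ['4'] (pvRep ['Y','o','u'] ['U']
                          (pvRep ['y','o','u'] ['U'] (pvRep ['t','o','o'] ['2']
                            (pvRep ['a','n','d'] ['&'] t)))) :=
                    pvRep_cons_ne _ _ _ _ (pvPreNot _ _ i5)
                  rw [pvChain, w1, w2, w3, w4, w5, pvChain]
                rw [e]
                by_cases hv : c ∈ pvVowels
                · rw [List.filter_cons_of_neg (by simp [hv]), ih t hlt, pvScanB]
                  simp [h1, h2, h3, h4, h5, hv]
                · rw [List.filter_cons_of_pos (by simp [hv]), ih t hlt, pvScanB]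
                  simp [h1, h2, h3, h4, h5, hv]

theorem pvFoldl_filter (cs : List Char) :
    ∀ u : List Char,
      cs.foldl (fun u c => if c ∈ pvVowels then u.filter (fun x => x != c) else u) u
        = u.filter (fun x => !(decide (x ∈ pvVowels) && decide (x ∈ cs))) := by
  induction cs with
  | nil => intro u; simp
  | cons c cs ih =>
    intro u
    rw [List.foldl_cons, ih]
    by_cases hc : c ∈ pvVowels
    · rw [if_pos hc, List.filter_filter]
      apply List.filter_congr
      intro x _
      by_cases hx : x = c
      · subst hx; simp [hc]
      · simp [hx, bne]
    · rw [if_neg hc]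
      apply List.filter_congr
      intro x _
      by_cases hx : x = c
      · subst hx; simp [hc]
      · simp [hx]

theorem pvIsIn_singleton (c : Char) :
    PySem.Str.isIn (String.ofList [c]) "aeiouAEIO" = decide (c ∈ pvVowels) := by
  by_cases h : c ∈ pvVowels
  · simp [h]
    rw [PySem.Chars.isIn_iff_infix, List.singleton_infix_iff]
    exact h
  · simp [h]
    rw [← Bool.not_eq_true, PySem.Chars.isIn_iff_infix, List.singleton_infix_iff]
    exact h

theorem pvRep_toList (x p r : String) (hp : p.toList ≠ []) :
    (PySem.Str.replace x p r).toList = pvRep p.toList r.toList x.toList := by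
  rw [PySem.Str.replace, String.toList_ofList, pvReplace_eq _ _ _ hp]

theorem pvFoldl_toList (cs : List Char) :
    ∀ a : String,
      (cs.foldl (fun (acc : String) c =>
          if PySem.Str.isIn (String.ofList [c]) "aeiouAEIO" then
            PySem.Str.replace acc (String.ofList [c]) "" else acc) a).toList
        = cs.foldl (fun u c => if c ∈ pvVowels then u.filter (fun x => x != c) else u) a.toList := by
  induction cs with
  | nil => intro a; simp
  | cons c cs ih =>
    intro a
    rw [List.foldl_cons, List.foldl_cons, ih]
    congr 1
    rw [pvIsIn_singleton c]
    by_cases hc : c ∈ pvVowels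
    · rw [if_pos (by simp [hc]), if_pos hc]
      show (PySem.Str.replace a (String.ofList [c]) "").toList = _
      rw [PySem.Str.replace]
      rw [String.toList_ofList]
      rw [pvReplace_eq _ _ _ (by simp)]
      simp
      rw [pvRep_single_nil]
    · simp [hc]

theorem pvNot_in_lower (g pat : String) (s : List Char)
    (hlow : pat.toList.map PySem.Chars.lowerChar = g.toList)
    (hg : PySem.Chars.isIn g.toList (PySem.Chars.lower s) = false) :
    ¬ pat.toList <:+: s := by
  intro h
  have h2 : pat.toList.map PySem.Chars.lowerChar <:+: s.map PySem.Chars.lowerChar :=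
    List.IsInfix.map PySem.Chars.lowerChar h
  rw [hlow] at h2
  rw [PySem.Chars.isIn_eq_false_iff] at hg
  exact hg (by simpa [PySem.Chars.lower] using h2)

theorem pvStage (g pat rep : String) (s : String) (hp : pat.toList ≠ [])
    (hlow : pat.toList.map PySem.Chars.lowerChar = g.toList) :
    (if PySem.Str.isIn g (PySem.Str.lower s) then PySem.Str.replace s pat rep else s).toList
      = pvRep pat.toList rep.toList s.toList := by
  by_cases hg : PySem.Str.isIn g (PySem.Str.lower s) = true
  · rw [if_pos hg, PySem.Str.replace, String.toList_ofList, pvReplace_eq _ _ _ hp]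
  · rw [if_neg (by simpa using hg)]
    have hni : PySem.Chars.isIn g.toList (PySem.Chars.lower s.toList) = false := by
      rw [← Bool.not_eq_true]
      simpa using hg
    rw [pvRep_id _ _ _ (pvNot_in_lower g pat s.toList hlow hni)]

theorem pvA_toList (short : String) :
    (short_hand short).toList = (pvChain short.toList).filter (fun x => !(decide (x ∈ pvVowels))) := by
  simp only [short_hand]
  set s1 := if PySem.Str.isIn "and" (PySem.Str.lower short) then PySem.Str.replace short "and" "&" else short with hs1
  set s2 := if PySem.Str.isIn "too" (PySem.Str.lower s1) then PySem.Str.replace s1 "too" "2" else s1 with hs2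
  set s3 := if PySem.Str.isIn "you" (PySem.Str.lower s2) then
      PySem.Str.replace (PySem.Str.replace s2 "you" "U") "You" "U" else s2 with hs3
  set s4 := if PySem.Str.isIn "for" (PySem.Str.lower s3) then PySem.Str.replace s3 "for" "4" else s3 with hs4
  have e1 : s1.toList = pvRep ['a','n','d'] ['&'] short.toList :=
    pvStage "and" "and" "&" short (by decide) (by decide)
  have e2 : s2.toList = pvRep ['t','o','o'] ['2'] (pvRep ['a','n','d'] ['&'] short.toList) := by
    rw [← e1]; exact pvStage "too" "too" "2" s1 (by decide) (by decide)
  have e3 : s3.toList = pvRep "You".toList "U".toList (pvRep "you".toList "U".toList s2.toList) := by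
    rw [hs3]
    by_cases hg : PySem.Str.isIn "you" (PySem.Str.lower s2) = true
    · rw [if_pos hg, pvRep_toList _ "You" "U" (by decide), pvRep_toList _ "you" "U" (by decide)]
    · rw [if_neg (by simpa using hg)]
      have hni : PySem.Chars.isIn "you".toList (PySem.Chars.lower s2.toList) = false := by
        rw [← Bool.not_eq_true]; simpa using hg
      rw [pvRep_id _ _ _ (pvNot_in_lower "you" "you" _ (by decide) hni),
        pvRep_id _ _ _ (pvNot_in_lower "you" "You" _ (by decide) hni)]
  have e4 : s4.toList = pvChain short.toList := by
    have := pvStage "for" "for" "4" s3 (by decide) (by decide)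
    rw [hs4, this, e3, e2, pvChain]
    rfl
  rw [pvFoldl_toList, pvFoldl_filter, e4]
  apply List.filter_congr
  intro x hx
  simp [hx]

-- ===== VERDICT (by name: the statement is the Claim_ definition above) =====
theorem short_hand_spec : Claim_equal_short_hand := by
  intro short _
  unfold Spec_short_hand short_hand_alt
  have h := pvA_toList short
  rw [pvChain_scan_aux short.toList.length short.toList le_rfl] at h
  calc short_hand short = String.ofList (short_hand short).toList := String.ofList_toList.symm
    _ = String.ofList (pvScanB short.toList) := by rw [h]
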